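-- pv_equiv track=rewrite | github.com/haolunc/ARC-RL | reference_solutions/solutions/d90796e8.py | transform
-- ===== SOURCE A (Python) =====
-- def transform(grid):
--
--     h = len(grid)
--     w = len(grid[0]) if h else 0
--
--     pairs = []
--
--     dirs = [(-1, 0), (1, 0), (0, -1), (0, 1)]
--
--     for r in range(h):
--         for c in range(w):
--             if grid[r][c] == 3:
--                 for dr, dc in dirs:
--                     nr, nc = r + dr, c + dc
--                     if 0 <= nr < h and 0 <= nc < w and grid[nr][nc] == 2:
--                         pairs.append((r, c, nr, nc))
--
--     for r3, c3, r2, c2 in pairs: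
--         grid[r3][c3] = 8
--         grid[r2][c2] = 0
--
--     return grid
-- ===== SOURCE B (Python) =====
-- def transform(grid):
--     h = len(grid)
--     w = len(grid[0]) if h else 0
--     orig = [row[:] for row in grid]
--     dirs = ((-1, 0), (1, 0), (0, -1), (0, 1))
--
--     def near(r, c, t):
--         return any(0 <= r + dr < h and 0 <= c + dc < w and orig[r + dr][c + dc] == t
--                    for dr, dc in dirs)
--
--     for r in range(h):
--         for c in range(w):
--             v = orig[r][c]
--             if v == 3 and near(r, c, 2):
--                 grid[r][c] = 8
--             elif v == 2 and near(r, c, 3):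
--                 grid[r][c] = 0
--     return grid
-- ===== Notes on version B (the rewrite author's own statement) =====
-- stated objective: alternative
-- what changed: Instead of collecting a pairs list of (3-cell, 2-cell) coordinates and then applying the writes, B takes a snapshot of the grid and makes one symmetric pass that decides each cell locally: a 3 with an orthogonal 2-neighbour becomes 8, a 2 with an orthogonal 3-neighbour becomes 0.
import Mathlib
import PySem

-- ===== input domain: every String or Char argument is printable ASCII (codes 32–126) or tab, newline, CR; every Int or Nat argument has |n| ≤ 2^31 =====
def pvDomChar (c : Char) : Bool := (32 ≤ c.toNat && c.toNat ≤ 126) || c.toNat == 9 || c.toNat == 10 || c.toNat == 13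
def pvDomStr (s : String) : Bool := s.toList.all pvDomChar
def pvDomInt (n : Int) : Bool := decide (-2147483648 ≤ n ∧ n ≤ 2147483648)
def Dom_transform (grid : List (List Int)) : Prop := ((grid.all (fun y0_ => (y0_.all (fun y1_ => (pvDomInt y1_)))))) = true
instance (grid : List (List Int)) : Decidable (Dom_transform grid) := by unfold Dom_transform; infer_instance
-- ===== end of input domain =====

-- B is an alternative decomposition of the same task: one symmetric pass over a snapshot of
-- the grid (3 with a 2-neighbour → 8, 2 with a 3-neighbour → 0) instead of A's pairs list
-- followed by a write-back loop.  Python A and Python B both mutate `grid` in place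
-- identically and return it; the equivalence proved here is about the returned value.

-- grid[r][c] read; always in range on inputs admitted by Pre_transform (getD 0 never hit there)
def pvCell (g : List (List Int)) (r c : Int) : Int :=
  (((PySem.List.pyGet? g r).bind (fun row => PySem.List.pyGet? row c)).getD 0)

-- grid[r][c] = v  (functional in-place write)
def pvSet (g : List (List Int)) (r c v : Int) : List (List Int) :=
  g.mapIdx (fun i row => if (i : Int) = r then row.mapIdx (fun j x => if (j : Int) = c then v else x) else row)

def pvDirs : List (Int × Int) := [(-1, 0), (1, 0), (0, -1), (0, 1)]

-- h = len(grid);  w = len(grid[0]) if h else 0   (shared locals of A and B)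
def pvH (grid : List (List Int)) : Int := grid.length
def pvW (grid : List (List Int)) : Int :=
  if pvH grid ≠ 0 then (((PySem.List.pyGet? grid 0).getD []).length : Int) else 0

-- ===== PORT A =====
def pvPairs (grid : List (List Int)) : List (Int × Int × Int × Int) :=
  (PySem.List.pyRange 0 (pvH grid) 1).foldl (fun acc r =>
    (PySem.List.pyRange 0 (pvW grid) 1).foldl (fun acc c =>
      if pvCell grid r c = 3 then
        pvDirs.foldl (fun acc d =>
          if 0 ≤ r + d.1 ∧ r + d.1 < pvH grid ∧ 0 ≤ c + d.2 ∧ c + d.2 < pvW grid ∧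
              pvCell grid (r + d.1) (c + d.2) = 2 then
            acc ++ [(r, c, r + d.1, c + d.2)]
          else acc) acc
      else acc) acc) []

def transform (grid : List (List Int)) : List (List Int) :=
  (pvPairs grid).foldl (fun g p => pvSet (pvSet g p.1 p.2.1 8) p.2.2.1 p.2.2.2 0) grid

-- ===== PORT B =====
-- any(0 <= r+dr < h and 0 <= c+dc < w and orig[r+dr][c+dc] == t for dr, dc in dirs)
def pvNear (orig : List (List Int)) (h w r c t : Int) : Bool :=
  pvDirs.any (fun d =>
    decide (0 ≤ r + d.1) && decide (r + d.1 < h) && decide (0 ≤ c + d.2) && decide (c + d.2 < w) &&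
    decide (pvCell orig (r + d.1) (c + d.2) = t))

-- `grid` (the first foldl state) plays `grid`'s mutable role; `orig`, the snapshot copy all
-- cells are read from, is the unchanged argument.
def transform_alt (grid : List (List Int)) : List (List Int) :=
  (PySem.List.pyRange 0 (pvH grid) 1).foldl (fun g r =>
    (PySem.List.pyRange 0 (pvW grid) 1).foldl (fun g c =>
      if pvCell grid r c = 3 ∧ pvNear grid (pvH grid) (pvW grid) r c 2 = true then pvSet g r c 8
      else if pvCell grid r c = 2 ∧ pvNear grid (pvH grid) (pvW grid) r c 3 = true then pvSet g r c 0
      else g) g) grid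

-- ===== PRECONDITION & SPEC =====
-- Pre_ excludes exactly the ragged grids on which Python A (and Python B alike) raises
-- IndexError: some row shorter than the first row, whose length is taken as the width.
def Pre_transform (grid : List (List Int)) : Prop :=
  ∀ row ∈ grid, (grid.headD []).length ≤ row.length
instance (grid : List (List Int)) : Decidable (Pre_transform grid) := by unfold Pre_transform; infer_instance

def pvWitness_transform : List (List Int) := [[3, 2], [0, 0]]

def Spec_transform (grid : List (List Int)) (out : List (List Int)) : Prop := out = transform_alt grid
instance (grid : List (List Int)) (out : List (List Int)) : Decidable (Spec_transform grid out) := by unfold Spec_transform; infer_instance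

-- ===== CLAIM (what is proved, stated in full; the proofs are below) =====
def Claim_equal_transform : Prop := ∀ (grid : List (List Int)), Dom_transform grid → Pre_transform grid → Spec_transform grid (transform grid)

-- ===== LEMMAS AND PROOFS =====

def pvGet2 (g : List (List Int)) (i j : Nat) : Option Int := g[i]?.bind (fun row => row[j]?)

theorem pvGet2_pvSet (g : List (List Int)) (r c v : Int) (i j : Nat) :
    pvGet2 (pvSet g r c v) i j =
      if (i : Int) = r ∧ (j : Int) = c then (pvGet2 g i j).map (fun _ => v) else pvGet2 g i j := by
  unfold pvGet2 pvSet
  cases hg : g[i]? with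
  | none => simp [List.getElem?_mapIdx, hg]
  | some row =>
    simp only [List.getElem?_mapIdx, hg, Option.map_some, Option.bind_some]
    by_cases hi : (i : Int) = r
    · simp only [hi, if_true, true_and]
      cases hr : row[j]? with
      | none => simp [List.getElem?_mapIdx, hr]
      | some x =>
        by_cases hj : (j : Int) = c
        · simp [List.getElem?_mapIdx, hr, hj]
        · simp [List.getElem?_mapIdx, hr, hj]
    · simp [hi]

theorem shape_pvSet (g : List (List Int)) (r c v : Int) :
    (pvSet g r c v).map List.length = g.map List.length := by
  unfold pvSet
  apply List.ext_getElem?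
  intro i
  simp only [List.getElem?_map, List.getElem?_mapIdx]
  cases hg : g[i]? with
  | none => simp
  | some row => by_cases hi : (i : Int) = r <;> simp [hi]

theorem shape_foldl {α : Type} (f : List (List Int) → α → List (List Int))
    (hf : ∀ g p, (f g p).map List.length = g.map List.length)
    (ps : List α) (g0 : List (List Int)) :
    (ps.foldl f g0).map List.length = g0.map List.length := by
  induction ps generalizing g0 with
  | nil => rfl
  | cons p ps ih => simpa [List.foldl_cons, hf] using ih (f g0 p)

theorem pvExt2 (x y : List (List Int))
    (hs : x.map List.length = y.map List.length)
    (hc : ∀ i j, pvGet2 x i j = pvGet2 y i j) : x = y := by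
  apply List.ext_getElem?
  intro i
  have hrow : (x[i]?).map List.length = (y[i]?).map List.length := by
    simpa [List.getElem?_map] using congrArg (fun l => l[i]?) hs
  cases hx : x[i]? with
  | none =>
    cases hy : y[i]? with
    | none => rfl
    | some b => rw [hx, hy] at hrow; simp at hrow
  | some a =>
    cases hy : y[i]? with
    | none => rw [hx, hy] at hrow; simp at hrow
    | some b =>
      rw [hx, hy] at hrow
      simp only [Option.map_some, Option.some.injEq] at hrow
      have hab : a = b := by
        apply List.ext_getElem?
        intro j
        have := hc i j
        unfold pvGet2 at this
        rw [hx, hy] at this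
        simpa using this
      rw [hab]

-- a fold that only appends g x at each step is the flatMap
theorem foldl_body_append {α β : Type} (body : List β → α → List β) (g : α → List β)
    (hb : ∀ acc x, body acc x = acc ++ g x) :
    ∀ (l : List α) (acc : List β), l.foldl body acc = acc ++ l.flatMap g := by
  intro l
  induction l with
  | nil => simp
  | cons x l ih => intro acc; rw [List.foldl_cons, hb, ih, List.flatMap_cons, List.append_assoc]

-- the common per-cell decision: cell (i,j) holds t and has an in-bounds orthogonal neighbour holding u
def pvMark (grid : List (List Int)) (h w t u i j : Int) : Prop :=
  0 ≤ i ∧ i < h ∧ 0 ≤ j ∧ j < w ∧ pvCell grid i j = t ∧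
    ∃ d ∈ pvDirs, 0 ≤ i + d.1 ∧ i + d.1 < h ∧ 0 ≤ j + d.2 ∧ j + d.2 < w ∧
      pvCell grid (i + d.1) (j + d.2) = u

theorem pvDirs_neg_mem : ∀ d ∈ pvDirs, (-d.1, -d.2) ∈ pvDirs := by decide

-- A-side: closed form of the pairs list
theorem pairs_eq (grid : List (List Int)) :
    pvPairs grid
    = (PySem.List.pyRange 0 (pvH grid) 1).flatMap (fun r =>
        (PySem.List.pyRange 0 (pvW grid) 1).flatMap (fun c =>
          if pvCell grid r c = 3 then
            (pvDirs.filter (fun d =>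
              decide (0 ≤ r + d.1 ∧ r + d.1 < pvH grid ∧ 0 ≤ c + d.2 ∧ c + d.2 < pvW grid ∧
                pvCell grid (r + d.1) (c + d.2) = 2))).map (fun d => (r, c, r + d.1, c + d.2))
          else [])) := by
  unfold pvPairs
  have hinner : ∀ (r c : Int) (acc : List (Int × Int × Int × Int)),
      (if pvCell grid r c = 3 then
        pvDirs.foldl (fun acc d =>
          if 0 ≤ r + d.1 ∧ r + d.1 < pvH grid ∧ 0 ≤ c + d.2 ∧ c + d.2 < pvW grid ∧
              pvCell grid (r + d.1) (c + d.2) = 2 then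
            acc ++ [(r, c, r + d.1, c + d.2)]
          else acc) acc
      else acc)
      = acc ++ (if pvCell grid r c = 3 then
          (pvDirs.filter (fun d =>
            decide (0 ≤ r + d.1 ∧ r + d.1 < pvH grid ∧ 0 ≤ c + d.2 ∧ c + d.2 < pvW grid ∧
              pvCell grid (r + d.1) (c + d.2) = 2))).map (fun d => (r, c, r + d.1, c + d.2))
        else []) := by
    intro r c acc
    by_cases h3 : pvCell grid r c = 3
    · rw [if_pos h3, if_pos h3, PySem.List.foldl_append_ite]
    · rw [if_neg h3, if_neg h3, List.append_nil]
  have hmid : ∀ (r : Int) (acc : List (Int × Int × Int × Int)),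
      ((PySem.List.pyRange 0 (pvW grid) 1).foldl (fun acc c =>
        if pvCell grid r c = 3 then
          pvDirs.foldl (fun acc d =>
            if 0 ≤ r + d.1 ∧ r + d.1 < pvH grid ∧ 0 ≤ c + d.2 ∧ c + d.2 < pvW grid ∧
                pvCell grid (r + d.1) (c + d.2) = 2 then
              acc ++ [(r, c, r + d.1, c + d.2)]
            else acc) acc
        else acc) acc)
      = acc ++ (PySem.List.pyRange 0 (pvW grid) 1).flatMap (fun c =>
          if pvCell grid r c = 3 then
            (pvDirs.filter (fun d =>
              decide (0 ≤ r + d.1 ∧ r + d.1 < pvH grid ∧ 0 ≤ c + d.2 ∧ c + d.2 < pvW grid ∧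
                pvCell grid (r + d.1) (c + d.2) = 2))).map (fun d => (r, c, r + d.1, c + d.2))
          else []) := by
    intro r acc
    exact foldl_body_append _ _ (fun acc c => hinner r c acc) _ acc
  rw [foldl_body_append _ _ (fun acc r => hmid r acc) _ [], List.nil_append]

-- membership in the pairs list, characterised
theorem mem_pairs_iff (grid : List (List Int)) (p : Int × Int × Int × Int) :
    (p ∈ pvPairs grid
      ↔ ∃ r c d, (0 ≤ r ∧ r < pvH grid) ∧ (0 ≤ c ∧ c < pvW grid) ∧ pvCell grid r c = 3 ∧ d ∈ pvDirs ∧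
          (0 ≤ r + d.1 ∧ r + d.1 < pvH grid ∧ 0 ≤ c + d.2 ∧ c + d.2 < pvW grid ∧
            pvCell grid (r + d.1) (c + d.2) = 2) ∧
          p = (r, c, r + d.1, c + d.2)) := by
  rw [pairs_eq]
  simp only [List.mem_flatMap, PySem.List.mem_pyRange_one]
  constructor
  · rintro ⟨r, hr, c, hc, hp⟩
    by_cases h3 : pvCell grid r c = 3
    · rw [if_pos h3] at hp
      simp only [List.mem_map, List.mem_filter, decide_eq_true_eq] at hp
      obtain ⟨d, ⟨hd, hg⟩, hpe⟩ := hp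
      exact ⟨r, c, d, hr, hc, h3, hd, hg, hpe.symm⟩
    · rw [if_neg h3] at hp; simp at hp
  · rintro ⟨r, c, d, hr, hc, h3, hd, hg, hpe⟩
    refine ⟨r, hr, c, hc, ?_⟩
    rw [if_pos h3]
    simp only [List.mem_map, List.mem_filter, decide_eq_true_eq]
    exact ⟨d, ⟨hd, hg⟩, hpe.symm⟩

-- A-side write-back fold, cell by cell
theorem foldA_get2 (grid : List (List Int)) (ps : List (Int × Int × Int × Int)) (i j : Nat) :
    ∀ (g0 : List (List Int)),
    (∀ p ∈ ps, pvCell grid p.1 p.2.1 = 3 ∧ pvCell grid p.2.2.1 p.2.2.2 = 2) →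
    pvGet2 (ps.foldl (fun g p => pvSet (pvSet g p.1 p.2.1 8) p.2.2.1 p.2.2.2 0) g0) i j =
      if ∃ p ∈ ps, p.1 = (i : Int) ∧ p.2.1 = (j : Int) then (pvGet2 g0 i j).map (fun _ => 8)
      else if ∃ p ∈ ps, p.2.2.1 = (i : Int) ∧ p.2.2.2 = (j : Int) then (pvGet2 g0 i j).map (fun _ => 0)
      else pvGet2 g0 i j := by
  induction ps with
  | nil => simp
  | cons p ps ih =>
    intro g0 hps
    have hp := hps p (List.mem_cons_self ..)
    have hps' : ∀ q ∈ ps, pvCell grid q.1 q.2.1 = 3 ∧ pvCell grid q.2.2.1 q.2.2.2 = 2 :=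
      fun q hq => hps q (List.mem_cons_of_mem _ hq)
    rw [List.foldl_cons, ih _ hps']
    have hstep : pvGet2 (pvSet (pvSet g0 p.1 p.2.1 8) p.2.2.1 p.2.2.2 0) i j =
        if p.2.2.1 = (i : Int) ∧ p.2.2.2 = (j : Int) then (pvGet2 g0 i j).map (fun _ => 0)
        else if p.1 = (i : Int) ∧ p.2.1 = (j : Int) then (pvGet2 g0 i j).map (fun _ => 8)
        else pvGet2 g0 i j := by
      rw [pvGet2_pvSet, pvGet2_pvSet]
      by_cases h2 : p.2.2.1 = (i : Int) ∧ p.2.2.2 = (j : Int)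
      · rw [if_pos ⟨h2.1.symm, h2.2.symm⟩, if_pos h2]
        by_cases h8 : (i : Int) = p.1 ∧ (j : Int) = p.2.1
        · exfalso
          have h3v := hp.1
          have h2v := hp.2
          rw [← h8.1, ← h8.2] at h3v
          rw [h2.1, h2.2] at h2v
          omega
        · rw [if_neg h8]
      · rw [if_neg (fun hx => h2 ⟨hx.1.symm, hx.2.symm⟩)]
        by_cases h8 : (i : Int) = p.1 ∧ (j : Int) = p.2.1
        · rw [if_pos h8, if_neg h2, if_pos ⟨h8.1.symm, h8.2.symm⟩]
        · rw [if_neg h8, if_neg h2, if_neg (fun hx => h8 ⟨hx.1.symm, hx.2.symm⟩)]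
    by_cases e3 : ∃ q ∈ ps, q.1 = (i : Int) ∧ q.2.1 = (j : Int)
    · rw [if_pos e3, if_pos (by obtain ⟨q, hq, hqe⟩ := e3; exact ⟨q, List.mem_cons_of_mem _ hq, hqe⟩)]
      rw [hstep]
      split_ifs <;> cases pvGet2 g0 i j <;> rfl
    · rw [if_neg e3]
      by_cases e0 : ∃ q ∈ ps, q.2.2.1 = (i : Int) ∧ q.2.2.2 = (j : Int)
      · rw [if_pos e0]
        have hnot3 : ¬ ∃ q ∈ p :: ps, q.1 = (i : Int) ∧ q.2.1 = (j : Int) := by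
          rintro ⟨q, hq, hq1, hq2⟩
          rcases List.mem_cons.mp hq with rfl | hq'
          · obtain ⟨q', hq', hq'1, hq'2⟩ := e0
            have h3v := (hps q (List.mem_cons_self ..)).1
            have h2v := (hps' q' hq').2
            rw [hq1, hq2] at h3v
            rw [hq'1, hq'2] at h2v
            omega
          · exact e3 ⟨q, hq', hq1, hq2⟩
        rw [if_neg hnot3,
            if_pos (by obtain ⟨q, hq, hqe⟩ := e0; exact ⟨q, List.mem_cons_of_mem _ hq, hqe⟩)]
        rw [hstep]
        split_ifs <;> cases pvGet2 g0 i j <;> rfl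
      · rw [if_neg e0, hstep]
        by_cases c0 : p.2.2.1 = (i : Int) ∧ p.2.2.2 = (j : Int)
        · rw [if_pos c0]
          have hnot3 : ¬ ∃ q ∈ p :: ps, q.1 = (i : Int) ∧ q.2.1 = (j : Int) := by
            rintro ⟨q, hq, hq1, hq2⟩
            rcases List.mem_cons.mp hq with rfl | hq'
            · have h3v := (hps q (List.mem_cons_self ..)).1
              have h2v := (hps q (List.mem_cons_self ..)).2
              rw [hq1, hq2] at h3v
              rw [c0.1, c0.2] at h2v
              omega
            · exact e3 ⟨q, hq', hq1, hq2⟩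
          rw [if_neg hnot3, if_pos ⟨p, List.mem_cons_self .., c0⟩]
        · rw [if_neg c0]
          by_cases c3 : p.1 = (i : Int) ∧ p.2.1 = (j : Int)
          · rw [if_pos c3, if_pos ⟨p, List.mem_cons_self .., c3⟩]
          · rw [if_neg c3,
                if_neg (by rintro ⟨q, hq, hqe⟩
                           rcases List.mem_cons.mp hq with rfl | hq'
                           · exact c3 hqe
                           · exact e3 ⟨q, hq', hqe⟩),
                if_neg (by rintro ⟨q, hq, hqe⟩
                           rcases List.mem_cons.mp hq with rfl | hq'
                           · exact c0 hqe
                           · exact e0 ⟨q, hq', hqe⟩)]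

-- B-side fold, cell by cell
theorem foldB_get2 (grid : List (List Int)) (h w : Int) (i j : Nat) (rs : List Int) :
    ∀ (g0 : List (List Int)),
    pvGet2 (rs.foldl (fun g r =>
      (PySem.List.pyRange 0 w 1).foldl (fun g c =>
        if pvCell grid r c = 3 ∧ pvNear grid h w r c 2 = true then pvSet g r c 8
        else if pvCell grid r c = 2 ∧ pvNear grid h w r c 3 = true then pvSet g r c 0
        else g) g) g0) i j =
      if (i : Int) ∈ rs ∧ 0 ≤ (j : Int) ∧ (j : Int) < w then
        (if pvCell grid i j = 3 ∧ pvNear grid h w i j 2 = true then (pvGet2 g0 i j).map (fun _ => 8)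
         else if pvCell grid i j = 2 ∧ pvNear grid h w i j 3 = true then (pvGet2 g0 i j).map (fun _ => 0)
         else pvGet2 g0 i j)
      else pvGet2 g0 i j := by
  induction rs with
  | nil => simp
  | cons r rs ih =>
    intro g0
    rw [List.foldl_cons, ih]
    have hrow : ∀ (cs : List Int) (g1 : List (List Int)),
        pvGet2 (cs.foldl (fun g c =>
          if pvCell grid r c = 3 ∧ pvNear grid h w r c 2 = true then pvSet g r c 8
          else if pvCell grid r c = 2 ∧ pvNear grid h w r c 3 = true then pvSet g r c 0
          else g) g1) i j =
        if (i : Int) = r ∧ (j : Int) ∈ cs then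
          (if pvCell grid i j = 3 ∧ pvNear grid h w i j 2 = true then (pvGet2 g1 i j).map (fun _ => 8)
           else if pvCell grid i j = 2 ∧ pvNear grid h w i j 3 = true then (pvGet2 g1 i j).map (fun _ => 0)
           else pvGet2 g1 i j)
        else pvGet2 g1 i j := by
      intro cs
      induction cs with
      | nil => simp
      | cons c cs ihc =>
        intro g1
        rw [List.foldl_cons, ihc]
        have hone : pvGet2 (if pvCell grid r c = 3 ∧ pvNear grid h w r c 2 = true then pvSet g1 r c 8
            else if pvCell grid r c = 2 ∧ pvNear grid h w r c 3 = true then pvSet g1 r c 0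
            else g1) i j =
          if (i : Int) = r ∧ (j : Int) = c then
            (if pvCell grid i j = 3 ∧ pvNear grid h w i j 2 = true then (pvGet2 g1 i j).map (fun _ => 8)
             else if pvCell grid i j = 2 ∧ pvNear grid h w i j 3 = true then (pvGet2 g1 i j).map (fun _ => 0)
             else pvGet2 g1 i j)
          else pvGet2 g1 i j := by
          by_cases hij : (i : Int) = r ∧ (j : Int) = c
          · obtain ⟨h1, h2⟩ := hij
            subst h1
            subst h2
            rw [if_pos (show (i : Int) = (i : Int) ∧ (j : Int) = (j : Int) from ⟨rfl, rfl⟩)]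
            split_ifs with hA hB
            · rw [pvGet2_pvSet, if_pos (show (i : Int) = (i : Int) ∧ (j : Int) = (j : Int) from ⟨rfl, rfl⟩)]
            · rw [pvGet2_pvSet, if_pos (show (i : Int) = (i : Int) ∧ (j : Int) = (j : Int) from ⟨rfl, rfl⟩)]
            · rfl
          · rw [if_neg hij]
            split_ifs <;> first
              | rfl
              | (rw [pvGet2_pvSet, if_neg hij])
        by_cases hij : (i : Int) = r ∧ (j : Int) = c
        · rw [if_pos (show (i : Int) = r ∧ (j : Int) ∈ c :: cs from ⟨hij.1, by rw [hij.2]; exact List.mem_cons_self ..⟩)]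
          by_cases htl : (i : Int) = r ∧ (j : Int) ∈ cs
          · rw [if_pos htl, hone, if_pos hij]
            split_ifs <;> cases pvGet2 g1 i j <;> rfl
          · rw [if_neg htl, hone, if_pos hij]
        · by_cases htl : (i : Int) = r ∧ (j : Int) ∈ cs
          · rw [if_pos htl, if_pos (show (i : Int) = r ∧ (j : Int) ∈ c :: cs from ⟨htl.1, List.mem_cons_of_mem _ htl.2⟩), hone, if_neg hij]
          · rw [if_neg htl, hone, if_neg hij,
                if_neg (by rintro ⟨h1, h2⟩
                           rcases List.mem_cons.mp h2 with h2 | h2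
                           · exact hij ⟨h1, h2⟩
                           · exact htl ⟨h1, h2⟩)]
    rw [hrow]
    by_cases hir : (i : Int) = r ∧ (j : Int) ∈ PySem.List.pyRange 0 w 1
    · have hjw : 0 ≤ (j : Int) ∧ (j : Int) < w := by
        have := PySem.List.mem_pyRange_one.mp hir.2
        omega
      rw [if_pos hir, if_pos (show (i : Int) ∈ r :: rs ∧ 0 ≤ (j : Int) ∧ (j : Int) < w from ⟨by rw [hir.1]; exact List.mem_cons_self .., hjw⟩)]
      by_cases htl : (i : Int) ∈ rs ∧ 0 ≤ (j : Int) ∧ (j : Int) < w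
      · rw [if_pos htl]
        split_ifs <;> cases pvGet2 g0 i j <;> rfl
      · rw [if_neg htl]
    · by_cases htl : (i : Int) ∈ rs ∧ 0 ≤ (j : Int) ∧ (j : Int) < w
      · rw [if_pos htl, if_pos (show (i : Int) ∈ r :: rs ∧ 0 ≤ (j : Int) ∧ (j : Int) < w from ⟨List.mem_cons_of_mem _ htl.1, htl.2⟩), if_neg hir]
      · rw [if_neg htl, if_neg hir,
            if_neg (by rintro ⟨h1, h2⟩
                       rcases List.mem_cons.mp h1 with h1 | h1
                       · exact hir ⟨h1, PySem.List.mem_pyRange_one.mpr ⟨h2.1, h2.2⟩⟩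
                       · exact htl ⟨h1, h2⟩)]

-- a pair with its 3-position at (i,j) exists iff pvMark 3 2 holds there
theorem exists3_iff (grid : List (List Int)) (i j : Nat) :
    ((∃ r c d, (0 ≤ r ∧ r < pvH grid) ∧ (0 ≤ c ∧ c < pvW grid) ∧ pvCell grid r c = 3 ∧ d ∈ pvDirs ∧
        (0 ≤ r + d.1 ∧ r + d.1 < pvH grid ∧ 0 ≤ c + d.2 ∧ c + d.2 < pvW grid ∧
          pvCell grid (r + d.1) (c + d.2) = 2) ∧
        r = (i : Int) ∧ c = (j : Int))
      ↔ pvMark grid (pvH grid) (pvW grid) 3 2 (i : Int) (j : Int)) := by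
  unfold pvMark
  constructor
  · rintro ⟨r, c, d, hr, hc, h3, hd, hg, rfl, rfl⟩
    exact ⟨hr.1, hr.2, hc.1, hc.2, h3, d, hd, hg⟩
  · rintro ⟨h1, h2, h3, h4, h5, d, hd, hg⟩
    exact ⟨(i : Int), (j : Int), d, ⟨h1, h2⟩, ⟨h3, h4⟩, h5, hd, hg, rfl, rfl⟩

-- a pair with its 2-position at (i,j) exists iff pvMark 2 3 holds there (dirs are negation-closed)
theorem exists2_iff (grid : List (List Int)) (i j : Nat) :
    ((∃ r c d, (0 ≤ r ∧ r < pvH grid) ∧ (0 ≤ c ∧ c < pvW grid) ∧ pvCell grid r c = 3 ∧ d ∈ pvDirs ∧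
        (0 ≤ r + d.1 ∧ r + d.1 < pvH grid ∧ 0 ≤ c + d.2 ∧ c + d.2 < pvW grid ∧
          pvCell grid (r + d.1) (c + d.2) = 2) ∧
        r + d.1 = (i : Int) ∧ c + d.2 = (j : Int))
      ↔ pvMark grid (pvH grid) (pvW grid) 2 3 (i : Int) (j : Int)) := by
  unfold pvMark
  constructor
  · rintro ⟨r, c, d, hr, hc, h3, hd, hg, he1, he2⟩
    refine ⟨by omega, by omega, by omega, by omega, by rw [← he1, ← he2]; exact hg.2.2.2.2, ?_⟩
    refine ⟨(-d.1, -d.2), pvDirs_neg_mem d hd, ?_⟩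
    have hr1 : (i : Int) + -d.1 = r := by omega
    have hc1 : (j : Int) + -d.2 = c := by omega
    rw [hr1, hc1]
    exact ⟨hr.1, hr.2, hc.1, hc.2, h3⟩
  · rintro ⟨h1, h2, h3, h4, h5, d, hd, hg⟩
    refine ⟨(i : Int) + d.1, (j : Int) + d.2, (-d.1, -d.2), ⟨hg.1, hg.2.1⟩, ⟨hg.2.2.1, hg.2.2.2.1⟩,
      hg.2.2.2.2, pvDirs_neg_mem d hd, ?_, by omega, by omega⟩
    have e1 : (i : Int) + d.1 + -d.1 = (i : Int) := by omega
    have e2 : (j : Int) + d.2 + -d.2 = (j : Int) := by omega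
    rw [e1, e2]
    exact ⟨h1, h2, h3, h4, h5⟩

theorem pvNear_iff (grid : List (List Int)) (h w r c t : Int) :
    pvNear grid h w r c t = true ↔
      ∃ d ∈ pvDirs, 0 ≤ r + d.1 ∧ r + d.1 < h ∧ 0 ≤ c + d.2 ∧ c + d.2 < w ∧
        pvCell grid (r + d.1) (c + d.2) = t := by
  unfold pvNear
  simp [List.any_eq_true, and_assoc]

-- ===== VERDICT (by name: the statement is the Claim_ definition above) =====
theorem transform_spec : Claim_equal_transform := by
  intro grid _ _
  unfold Spec_transform transform transform_alt
  apply pvExt2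
  · rw [shape_foldl _ (fun g p => by rw [shape_pvSet, shape_pvSet]),
        shape_foldl _ (fun g r => shape_foldl _ (fun g c => by
          split_ifs <;> simp [shape_pvSet]) _ g)]
  · intro i j
    rw [foldB_get2]
    rw [foldA_get2 grid _ i j grid (by
      intro p hp
      obtain ⟨r, c, d, _, _, h3, _, hg, hpe⟩ := (mem_pairs_iff grid p).mp hp
      subst hpe
      exact ⟨h3, hg.2.2.2.2⟩)]
    have e3 := exists3_iff grid i j
    have e2 := exists2_iff grid i j
    have n2 := pvNear_iff grid (pvH grid) (pvW grid) (i : Int) (j : Int) 2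
    have n3 := pvNear_iff grid (pvH grid) (pvW grid) (i : Int) (j : Int) 3
    have hex3 : (∃ p ∈ pvPairs grid, p.1 = (i : Int) ∧ p.2.1 = (j : Int)) ↔
        pvMark grid (pvH grid) (pvW grid) 3 2 (i : Int) (j : Int) := by
      rw [← e3]
      constructor
      · rintro ⟨p, hp, hp1, hp2⟩
        obtain ⟨r, c, d, hr, hc, h3, hd, hg, hpe⟩ := (mem_pairs_iff grid p).mp hp
        subst hpe
        exact ⟨r, c, d, hr, hc, h3, hd, hg, hp1, hp2⟩
      · rintro ⟨r, c, d, hr, hc, h3, hd, hg, he1, he2⟩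
        exact ⟨(r, c, r + d.1, c + d.2),
          (mem_pairs_iff grid _).mpr ⟨r, c, d, hr, hc, h3, hd, hg, rfl⟩, he1, he2⟩
    have hex2 : (∃ p ∈ pvPairs grid, p.2.2.1 = (i : Int) ∧ p.2.2.2 = (j : Int)) ↔
        pvMark grid (pvH grid) (pvW grid) 2 3 (i : Int) (j : Int) := by
      rw [← e2]
      constructor
      · rintro ⟨p, hp, hp1, hp2⟩
        obtain ⟨r, c, d, hr, hc, h3, hd, hg, hpe⟩ := (mem_pairs_iff grid p).mp hp
        subst hpe
        exact ⟨r, c, d, hr, hc, h3, hd, hg, hp1, hp2⟩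
      · rintro ⟨r, c, d, hr, hc, h3, hd, hg, he1, he2⟩
        exact ⟨(r, c, r + d.1, c + d.2),
          (mem_pairs_iff grid _).mpr ⟨r, c, d, hr, hc, h3, hd, hg, rfl⟩, he1, he2⟩
    by_cases m3 : pvMark grid (pvH grid) (pvW grid) 3 2 (i : Int) (j : Int)
    · rw [if_pos (hex3.mpr m3)]
      obtain ⟨hb1, hb2, hb3, hb4, hv3, hnb⟩ := m3
      rw [if_pos ⟨PySem.List.mem_pyRange_one.mpr ⟨hb1, hb2⟩, hb3, hb4⟩,
          if_pos ⟨hv3, n2.mpr ⟨_, hnb.choose_spec.1, hnb.choose_spec.2⟩⟩]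
    · rw [if_neg (fun hx => m3 (hex3.mp hx))]
      by_cases m2 : pvMark grid (pvH grid) (pvW grid) 2 3 (i : Int) (j : Int)
      · rw [if_pos (hex2.mpr m2)]
        obtain ⟨hb1, hb2, hb3, hb4, hv2, hnb⟩ := m2
        rw [if_pos ⟨PySem.List.mem_pyRange_one.mpr ⟨hb1, hb2⟩, hb3, hb4⟩]
        rw [if_neg (by rintro ⟨hv3, _⟩; omega),
            if_pos ⟨hv2, n3.mpr ⟨_, hnb.choose_spec.1, hnb.choose_spec.2⟩⟩]
      · rw [if_neg (fun hx => m2 (hex2.mp hx))]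
        by_cases hib : ((i : Int) ∈ PySem.List.pyRange 0 (pvH grid) 1 ∧ 0 ≤ (j : Int) ∧ (j : Int) < pvW grid)
        · rw [if_pos hib]
          have hbnds := PySem.List.mem_pyRange_one.mp hib.1
          rw [if_neg (by
                rintro ⟨hv3, hnb⟩
                obtain ⟨d, hd, hg⟩ := n2.mp hnb
                exact m3 ⟨hbnds.1, hbnds.2, hib.2.1, hib.2.2, hv3, d, hd, hg⟩),
              if_neg (by
                rintro ⟨hv2, hnb⟩
                obtain ⟨d, hd, hg⟩ := n3.mp hnb
                exact m2 ⟨hbnds.1, hbnds.2, hib.2.1, hib.2.2, hv2, d, hd, hg⟩)]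
        · rw [if_neg hib]
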